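-- pv_equiv track=rewrite | github.com/Padrick77/3mftoglb | converter.py | decode_paint_color
-- ===== SOURCE A (Python) =====
-- from collections import Counter
--
-- def decode_paint_color(paint_color_hex):
--     """
--     Decode BambuStudio/Slic3r paint_color attribute.
--
--     The paint_color is a hex-nibble-encoded bit stream representing a recursive
--     triangle subdivision tree (TriangleSelector format):
--     - Convert hex string to bits (MSB first within each nibble)
--     - Read 2-bit states from the bit stream (bit0 + bit1*2)
--     - State 0 = subdivided into 4 children (read 4 more states recursively)
--     - States 1-3 = painted with filament/extruder
--
--     Returns the dominant state as a filament index (state value used directly).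
--     """
--     if not paint_color_hex:
--         return 0
--
--     # Convert hex string to bit array (MSB first within each nibble)
--     bits = []
--     for ch in paint_color_hex:
--         nibble = int(ch, 16)
--         bits.append((nibble >> 3) & 1)
--         bits.append((nibble >> 2) & 1)
--         bits.append((nibble >> 1) & 1)
--         bits.append(nibble & 1)
--
--     # State counter: count leaf sub-triangles for each state
--     state_counts = Counter()
--     pos = [0]
--
--     def read_state(depth=0):
--         if pos[0] + 2 > len(bits):
--             return
--         # Read 2-bit state (LSB first: bit0 + bit1*2)
--         state = bits[pos[0]] + bits[pos[0] + 1] * 2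
--         pos[0] += 2
--
--         if state == 0:
--             # Subdivided: 4 children follow
--             if depth < 20:
--                 for _ in range(4):
--                     read_state(depth + 1)
--         else:
--             state_counts[state] += 1
--
--     read_state()
--
--     if not state_counts:
--         return 0
--
--     # BambuStudio assigns paint states to non-default filaments:
--     # state 1 → first non-default (left-click paint color)
--     # state 2 → last non-default (right-click paint color)
--     # state 3 → middle non-default
--     # For a general mapping, we swap states 2 and 3 to match filament order
--     dominant = state_counts.most_common(1)[0][0]
--     REMAP = {1: 1, 2: 3, 3: 2}
--     return REMAP.get(dominant, dominant)
-- ===== SOURCE B (Python) =====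
-- def decode_paint_color(paint_color_hex):
--     # Same decoding, but with an explicit stack of depths instead of recursion,
--     # and a running-max scan instead of Counter.most_common.
--     bits = []
--     for ch in paint_color_hex:
--         n = int(ch, 16)
--         bits += [(n >> 3) & 1, (n >> 2) & 1, (n >> 1) & 1, n & 1]
--
--     counts = {}
--     pos = 0
--     stack = [0]
--     while stack:
--         depth = stack.pop()
--         if pos + 2 > len(bits):
--             continue
--         state = bits[pos] + bits[pos + 1] * 2
--         pos += 2
--         if state == 0:
--             if depth < 20:
--                 stack.extend((depth + 1,) * 4)
--         else:
--             counts[state] = counts.get(state, 0) + 1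
--
--     best = None
--     for item in counts.items():
--         if best is None or item[1] > best[1]:
--             best = item
--     if best is None:
--         return 0
--     s = best[0]
--     return 5 - s if s in (2, 3) else s
-- ===== Notes on version B (the rewrite author's own statement) =====
-- stated objective: alternative
-- what changed: Replaced the recursive read_state (closure over a mutable pos cell) with an explicit stack of depth values driving one while-loop, built the bit list by extending four bits at once, replaced Counter/most_common with a plain dict and a single running-max scan over its items, and replaced the REMAP dict lookup by the arithmetic 5-s for states 2 and 3.
import Mathlib
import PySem

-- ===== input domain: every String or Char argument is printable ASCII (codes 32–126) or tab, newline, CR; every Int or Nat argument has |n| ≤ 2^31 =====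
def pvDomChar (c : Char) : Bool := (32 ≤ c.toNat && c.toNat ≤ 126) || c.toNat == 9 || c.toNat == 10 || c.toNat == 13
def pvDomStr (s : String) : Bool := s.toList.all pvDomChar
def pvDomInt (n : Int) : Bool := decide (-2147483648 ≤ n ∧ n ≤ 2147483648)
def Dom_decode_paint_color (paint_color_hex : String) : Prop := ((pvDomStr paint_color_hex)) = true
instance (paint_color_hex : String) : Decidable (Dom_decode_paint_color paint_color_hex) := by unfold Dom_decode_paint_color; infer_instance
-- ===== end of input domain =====

-- B replaces A's recursive tree walk by an explicit depth stack, Counter.most_common by a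
-- running-max scan, and the REMAP dict by arithmetic; same values everywhere A returns.

-- ===== PORT A =====
-- int(ch, 16): Pre_ guarantees ch is a hex digit, so ofCharsBase? is some; .getD 0 only
-- papers over the excluded ValueError inputs.
def pvNib (ch : Char) : Int := (PySem.Int.ofCharsBase? [ch] 16).getD 0

-- bits.append(...) four times per character
def pvBitsA (cs : List Char) : List Int :=
  cs.foldl (fun acc ch =>
    let n := pvNib ch
    ((((acc ++ [PySem.Int.band (n >>> 3) 1]) ++ [PySem.Int.band (n >>> 2) 1])
        ++ [PySem.Int.band (n >>> 1) 1]) ++ [PySem.Int.band n 1])) []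

-- read_state: fuel = 20 - depth (the 'depth < 20' guard is 'fuel > 0'); pos[0] is the Nat state.
-- bits[pos] is in range whenever read (pos + 2 ≤ len is checked first), so List.getD is exact.
def pvRead (bits : List Int) : Nat → Nat → PySem.Dict Int Int → Nat × PySem.Dict Int Int
  | fuel, pos, counts =>
    if pos + 2 > bits.length then (pos, counts)
    else
      let state : Int := bits.getD pos 0 + bits.getD (pos + 1) 0 * 2
      if state = 0 then
        match fuel with
        | 0 => (pos + 2, counts)
        | f + 1 =>
          let r1 := pvRead bits f (pos + 2) counts
          let r2 := pvRead bits f r1.1 r1.2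
          let r3 := pvRead bits f r2.1 r2.2
          pvRead bits f r3.1 r3.2
      else (pos + 2, counts.modify state 0 (· + 1))

def decode_paint_color (paint_color_hex : String) : Int :=
  if paint_color_hex.toList.isEmpty then 0
  else
    let bits := pvBitsA paint_color_hex.toList
    let counts := (pvRead bits 20 0 PySem.Dict.empty).2
    if counts.items.isEmpty then 0
    else
      -- state_counts.most_common(1)[0][0]: first item with maximal count
      let dominant := ((PySem.List.max? counts.items (fun p => p.2)).getD ((0 : Int), (0 : Int))).1
      (PySem.Dict.ofList [((1 : Int), (1 : Int)), (2, 3), (3, 2)]).getD dominant dominant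

-- ===== PORT B =====
-- int(ch, 16) on B's side; same PySem primitive, B's own helper
def pvNibB (ch : Char) : Int := (PySem.Int.ofCharsBase? [ch] 16).getD 0

-- bits += [four bits] per character
def pvBitsB (cs : List Char) : List Int :=
  cs.foldl (fun acc ch =>
    let n := pvNibB ch
    acc ++ [PySem.Int.band (n >>> 3) 1, PySem.Int.band (n >>> 2) 1,
            PySem.Int.band (n >>> 1) 1, PySem.Int.band n 1]) []

-- while stack: pop a depth (list head = Python list end), one frame per Python iteration
def pvLoop (bits : List Int) : List Nat → Nat → PySem.Dict Int Int → PySem.Dict Int Int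
  | [], _, counts => counts
  | d :: rest, pos, counts =>
    if pos + 2 > bits.length then pvLoop bits rest pos counts
    else
      let state : Int := bits.getD pos 0 + bits.getD (pos + 1) 0 * 2
      if state = 0 then
        if d < 20 then
          pvLoop bits ((d + 1) :: (d + 1) :: (d + 1) :: (d + 1) :: rest) (pos + 2) counts
        else pvLoop bits rest (pos + 2) counts
      else pvLoop bits rest (pos + 2) (counts.modify state 0 (· + 1))
  termination_by stack pos _ => (bits.length - pos, stack.length)
  decreasing_by all_goals (simp_wf; omega)

def decode_paint_color_alt (paint_color_hex : String) : Int :=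
  let bits := pvBitsB paint_color_hex.toList
  let counts := pvLoop bits [0] 0 PySem.Dict.empty
  -- best = None; for item in counts.items(): if best is None or item[1] > best[1]: best = item
  match counts.items.foldl
      (fun acc p => match acc with
        | none => some p
        | some b => if b.2 < p.2 then some p else some b)
      (none : Option (Int × Int)) with
  | none => 0
  | some b => if b.1 = 2 ∨ b.1 = 3 then 5 - b.1 else b.1

-- ===== PRECONDITION & SPEC =====
-- Pre_ excludes exactly the strings containing a non-hex-digit character, on which A's
-- int(ch, 16) raises ValueError.
def Pre_decode_paint_color (paint_color_hex : String) : Prop :=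
  (paint_color_hex.toList.all fun c =>
    (48 ≤ c.toNat && c.toNat ≤ 57) || (97 ≤ c.toNat && c.toNat ≤ 102)
      || (65 ≤ c.toNat && c.toNat ≤ 70)) = true
instance (paint_color_hex : String) : Decidable (Pre_decode_paint_color paint_color_hex) := by
  unfold Pre_decode_paint_color; infer_instance

def pvWitness_decode_paint_color : String := "4c"

def Spec_decode_paint_color (paint_color_hex : String) (out : Int) : Prop :=
  out = decode_paint_color_alt paint_color_hex
instance (paint_color_hex : String) (out : Int) : Decidable (Spec_decode_paint_color paint_color_hex out) := by
  unfold Spec_decode_paint_color; infer_instance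

-- ===== CLAIM (what is proved, stated in full; the proofs are below) =====
def Claim_equal_decode_paint_color : Prop := ∀ (paint_color_hex : String), Dom_decode_paint_color paint_color_hex → Pre_decode_paint_color paint_color_hex → Spec_decode_paint_color paint_color_hex (decode_paint_color paint_color_hex)

-- ===== LEMMAS AND PROOFS =====

-- the two bit-building folds append the same four bits per character
theorem pvBits_eq (cs : List Char) : pvBitsA cs = pvBitsB cs := by
  unfold pvBitsA pvBitsB
  apply PySem.List.foldl_congr_mem
  intro acc ch _
  simp [pvNib, pvNibB]

-- the stack loop processes one frame of depth d exactly as one recursive call with fuel 20 - d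
theorem pvLoop_eq_pvRead (bits : List Int) :
    ∀ (f d : Nat), f = 20 - d → ∀ (rest : List Nat) (pos : Nat) (counts : PySem.Dict Int Int),
      pvLoop bits (d :: rest) pos counts
        = pvLoop bits rest (pvRead bits f pos counts).1 (pvRead bits f pos counts).2 := by
  intro f
  induction f with
  | zero =>
    intro d hd rest pos counts
    have hd20 : ¬ d < 20 := by omega
    rw [pvLoop, pvRead]
    by_cases h1 : pos + 2 > bits.length
    · simp [h1]
    · by_cases h2 : bits[pos]?.getD 0 + bits[pos + 1]?.getD 0 * 2 = (0 : Int)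
      · simp [h1, h2, hd20]
      · simp [h1, h2]
  | succ f ih =>
    intro d hd rest pos counts
    have hd20 : d < 20 := by omega
    have hf : f = 20 - (d + 1) := by omega
    rw [pvLoop, pvRead]
    by_cases h1 : pos + 2 > bits.length
    · simp [h1]
    · by_cases h2 : bits[pos]?.getD 0 + bits[pos + 1]?.getD 0 * 2 = (0 : Int)
      · simp only [h1, if_false, hd20, if_true]
        rw [ih (d + 1) hf, ih (d + 1) hf, ih (d + 1) hf, ih (d + 1) hf]
        simp [List.getD_eq_getElem?_getD, h2]
      · simp [h1, h2]

-- the loop on the empty stack returns the counts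
theorem pvLoop_nil (bits : List Int) (pos : Nat) (counts : PySem.Dict Int Int) :
    pvLoop bits [] pos counts = counts := by
  rw [pvLoop]

-- B's running-max scan is Python's max(items, key=count) = most_common(1)[0]
theorem pvFold_eq_max? (l : List (Int × Int)) :
    l.foldl (fun acc p => match acc with
        | none => some p
        | some b => if b.2 < p.2 then some p else some b) (none : Option (Int × Int))
      = PySem.List.max? l (fun p => p.2) := by
  simp only [PySem.List.max?]
  apply List.foldl_ext
  intro acc x hx
  cases acc <;> rfl

-- REMAP.get(z, z) is the 5 - z swap on {2, 3}
theorem pvRemap_eq (z : Int) :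
    (PySem.Dict.ofList [((1 : Int), (1 : Int)), (2, 3), (3, 2)]).getD z z
      = if z = 2 ∨ z = 3 then 5 - z else z := by
  by_cases h2 : z = 2
  · subst h2; decide
  by_cases h3 : z = 3
  · subst h3; decide
  by_cases h1 : z = 1
  · subst h1; decide
  · have e1 : (((1 : Int) == z)) = false := by simp; omega
    have e2 : (((2 : Int) == z)) = false := by simp; omega
    have e3 : (((3 : Int) == z)) = false := by simp; omega
    simp [PySem.Dict.ofList, PySem.Dict.update, PySem.Dict.insert, PySem.Dict.getD,
      PySem.Dict.get?, PySem.Dict.contains, PySem.Dict.empty,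
      List.find?, e1, e2, e3, h2, h3]

-- ===== VERDICT (by name: the statement is the Claim_ definition above) =====
theorem decode_paint_color_spec : Claim_equal_decode_paint_color := by
  intro s _ _
  unfold Spec_decode_paint_color
  by_cases hemp : s.toList.isEmpty
  · -- empty string: A returns the guard's 0; B's loop skips its single frame and finds no best
    have h : s.toList = [] := by simpa using hemp
    simp [decode_paint_color, decode_paint_color_alt, h, pvBitsB, pvLoop, PySem.Dict.empty]
  · simp only [decode_paint_color, decode_paint_color_alt, hemp, Bool.false_eq_true, if_false,
      ← pvBits_eq, pvLoop_eq_pvRead _ 20 0 rfl, pvLoop_nil, pvFold_eq_max?]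
    set counts := (pvRead (pvBitsA s.toList) 20 0 PySem.Dict.empty).2 with hc
    by_cases hitems : counts.items.isEmpty
    · have h : counts.items = [] := by simpa using hitems
      simp [h, PySem.List.max?]
    · simp only [hitems, Bool.false_eq_true, if_false]
      have h : counts.items ≠ [] := by simpa using hitems
      obtain ⟨m, hm⟩ : ∃ m, PySem.List.max? counts.items (fun p => p.2) = some m := by
        rcases ho : PySem.List.max? counts.items (fun p => p.2) with _ | m
        · exact absurd ((PySem.List.max?_eq_none_iff _ _).mp ho) h
        · exact ⟨m, rfl⟩
      rw [hm]
      simp [pvRemap_eq]
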